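-- pv_equiv track=rewrite | github.com/fwjmath/assorted-tamari | blossoming.py | comb_to_path
-- ===== SOURCE A (Python) =====
-- def comb_to_path(n: int, k: int, uset: list[int]) -> list[int]:
--     path = [-1] * (k * n + 1)
--     for e in uset:
--         path[e] = k - 1
--     # find last lowest point
--     lidx, minh, height = 0, 0, 0
--     for i in range(len(path)):
--         height += path[i]
--         if height < minh:
--             lidx, minh = i + 1, height
--     # rotate for the path
--     path = path[lidx:] + path[:lidx]
--     # remove last step
--     path.pop()
--     return path
-- ===== SOURCE B (Python) =====
-- def comb_to_path(n: int, k: int, uset: list[int]) -> list[int]: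
--     L = k * n + 1
--     marks = sorted({e % L for e in uset})
--     # The height profile of the path can only reach a new minimum on a -1 step
--     # whose successor is a mark (or at the very end), so the rotation point is
--     # found among these O(|uset|) candidates instead of by scanning the path:
--     # just before the j-th mark m the height is k*j - m, at the end k*t - L.
--     best_v, best_i = 0, -1
--     for j, m in enumerate(marks):
--         if m > 0 and k * j - m < best_v:
--             best_v, best_i = k * j - m, m - 1
--     if k * len(marks) - L < best_v:
--         best_v, best_i = k * len(marks) - L, L - 1
--     lidx = best_i + 1
--     mset = set(marks)
--     path = [k - 1 if i in mset else -1 for i in range(L)]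
--     return (path[lidx:] + path[:lidx])[:-1]
-- ===== Notes on version B (the rewrite author's own statement) =====
-- stated objective: alternative
-- what changed: A builds the +/- step array and scans all k*n+1 prefix heights with a fused running-minimum to find the rotation point; B never scans the heights: it sorts the normalized mark set and picks the rotation point among the |uset|+1 closed-form candidates k*j-m (the height just before the j-th mark, plus the endpoint), since a prefix-height minimum can only occur just before a mark or at the very end; the rotated path is then emitted by set membership.
import Mathlib
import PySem

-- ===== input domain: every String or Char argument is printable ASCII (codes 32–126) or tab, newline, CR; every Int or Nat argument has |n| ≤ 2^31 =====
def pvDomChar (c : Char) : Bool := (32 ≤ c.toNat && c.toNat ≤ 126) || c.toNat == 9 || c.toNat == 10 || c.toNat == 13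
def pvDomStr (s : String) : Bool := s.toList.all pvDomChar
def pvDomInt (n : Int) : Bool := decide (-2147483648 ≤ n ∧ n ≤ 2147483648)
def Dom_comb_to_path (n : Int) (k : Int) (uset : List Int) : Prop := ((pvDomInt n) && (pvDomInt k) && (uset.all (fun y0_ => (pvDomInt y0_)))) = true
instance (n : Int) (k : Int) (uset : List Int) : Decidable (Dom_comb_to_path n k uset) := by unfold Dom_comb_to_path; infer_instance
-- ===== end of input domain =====

-- B finds the rotation point among the |uset|+1 closed-form candidate minima of the
-- height profile (just before each sorted mark, and the endpoint) instead of scanning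
-- the whole step array with a running minimum; same return value on Pre_.
-- ===== PORT A =====
-- A's scan 'for i in range(len(path)): height += path[i]; …' iterates the elements with
-- their index: ported as a foldl over PySem.List.enumerate path (same iterations, same values).
def comb_to_path (n : Int) (k : Int) (uset : List Int) : List Int :=
  let path := List.replicate (k * n + 1).toNat (-1 : Int)
  let path := uset.foldl (fun p e => PySem.List.pySetD p e (k - 1)) path
  -- lidx, minh, height = 0, 0, 0 ; fused scan updating on each strictly new minimum
  let st := (PySem.List.enumerate path 0).foldl
    (fun (st : Int × Int × Int) ix =>
      let height := st.2.2 + ix.2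
      if height < st.2.1 then (ix.1 + 1, height, height) else (st.1, st.2.1, height))
    (0, 0, 0)
  let lidx := st.1
  let path := PySem.List.slice path (some lidx) none ++ PySem.List.slice path none (some lidx)
  path.dropLast  -- path.pop(): path is nonempty under Pre_ (IndexError excluded there)

-- ===== PORT B =====
def comb_to_path_alt (n : Int) (k : Int) (uset : List Int) : List Int :=
  let L := k * n + 1
  -- marks = sorted({e % L for e in uset})
  let marks := PySem.List.sorted (PySem.Set.ofList (uset.map (fun e => PySem.Int.mod e L))) (fun x => x) false
  -- best_v, best_i = 0, -1 ; for j, m in enumerate(marks): …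
  let st := (PySem.List.enumerate marks 0).foldl
    (fun (st : Int × Int) jm =>
      if jm.2 > 0 ∧ k * jm.1 - jm.2 < st.1 then (k * jm.1 - jm.2, jm.2 - 1) else st)
    ((0 : Int), (-1 : Int))
  let st := if k * (marks.length : Int) - L < st.1 then (k * (marks.length : Int) - L, L - 1) else st
  let lidx := st.2 + 1
  let mset : PySem.Set Int := PySem.Set.ofList marks
  let path := (PySem.List.pyRange 0 L 1).map (fun i => if i ∈ mset then k - 1 else -1)
  PySem.List.slice (PySem.List.slice path (some lidx) none ++ PySem.List.slice path none (some lidx)) none (some (-1))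

-- ===== PRECONDITION & SPEC =====
-- Exactly where the Python A returns: k*n ≥ 0 (else the list is empty and path[e] / pop()
-- raise IndexError) and every e is an in-range (possibly negative, wrapping) index.
def Pre_comb_to_path (n : Int) (k : Int) (uset : List Int) : Prop :=
  0 ≤ k * n ∧ ∀ e ∈ uset, -(k * n + 1) ≤ e ∧ e < k * n + 1
instance (n : Int) (k : Int) (uset : List Int) : Decidable (Pre_comb_to_path n k uset) := by
  unfold Pre_comb_to_path; infer_instance
def pvWitness_comb_to_path : Int × Int × List Int := (2, 2, [0, 3, -1])

def Spec_comb_to_path (n : Int) (k : Int) (uset : List Int) (out : List Int) : Prop := out = comb_to_path_alt n k uset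
instance (n : Int) (k : Int) (uset : List Int) (out : List Int) : Decidable (Spec_comb_to_path n k uset out) := by unfold Spec_comb_to_path; infer_instance

-- ===== CLAIM (what is proved, stated in full; the proofs are below) =====
def Claim_equal_comb_to_path : Prop := ∀ (n : Int) (k : Int) (uset : List Int), Dom_comb_to_path n k uset → Pre_comb_to_path n k uset → Spec_comb_to_path n k uset (comb_to_path n k uset)

-- ===== LEMMAS AND PROOFS =====

-- prefix heights of p, starting from running height h
def pvAccum : Int → List Int → List Int
  | _, [] => []
  | h, x :: xs => (h + x) :: pvAccum (h + x) xs

-- "rotation index" A's fused scan is heading for, as a function of the prefix heights: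
-- first index of the overall minimum (+1 and offset i), if that minimum beats minh
def pvBest (lidx minh i : Int) : List Int → Int
  | [] => lidx
  | a :: t => if t.foldl min a < minh then i + (List.idxOf (t.foldl min a) (a :: t) : Int) + 1 else lidx

-- the path as a function of the normalized mark list
def pvPathL (k L : Int) (ms : List Int) : List Int :=
  (List.range L.toNat).map (fun i : Nat => if ((i : Int) ∈ ms) then k - 1 else -1)

-- B's strict-first running-minimum fold over (value, index) candidate pairs
def pvSfold (ps : List (Int × Int)) (st : Int × Int) : Int × Int :=
  ps.foldl (fun st c => if c.1 < st.1 then c else st) st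

theorem pvAccum_length (h : Int) (p : List Int) : (pvAccum h p).length = p.length := by
  induction p generalizing h with
  | nil => rfl
  | cons x xs ih => simp [pvAccum, ih]

theorem pvMark_length (us : List Int) (p : List Int) (v : Int) :
    (us.foldl (fun q e => PySem.List.pySetD q e v) p).length = p.length := by
  induction us generalizing p with
  | nil => rfl
  | cons e us ih => rw [List.foldl_cons, ih, PySem.List.length_pySetD]

theorem pvFoldlMin_min (t : List Int) (a b : Int) :
    t.foldl min (min a b) = min a (t.foldl min b) := by
  induction t generalizing b with
  | nil => simp
  | cons c t ih =>
    simp only [List.foldl_cons]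
    rw [min_assoc, ih]

theorem pvFoldlMin_mem (t : List Int) (a : Int) : t.foldl min a ∈ a :: t := by
  induction t generalizing a with
  | nil => simp
  | cons b t ih =>
    simp only [List.foldl_cons]
    rcases min_choice a b with h | h
    · rw [h]
      have h2 := ih a
      simp only [List.mem_cons] at h2 ⊢; tauto
    · rw [h]
      have h2 := ih b
      simp only [List.mem_cons] at h2 ⊢; tauto

-- A's fused scan computes pvBest of the prefix-height table
theorem pvScan_eq (p : List Int) : ∀ (h i lidx minh : Int),
    ((PySem.List.enumerate p i).foldl
      (fun (st : Int × Int × Int) ix =>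
        let height := st.2.2 + ix.2
        if height < st.2.1 then (ix.1 + 1, height, height) else (st.1, st.2.1, height))
      (lidx, minh, h)).1
    = pvBest lidx minh i (pvAccum h p) := by
  induction p with
  | nil => intro h i lidx minh; simp [PySem.List.enumerate_nil, pvAccum, pvBest]
  | cons x xs ih =>
    intro h i lidx minh
    rw [PySem.List.enumerate_cons, List.foldl_cons]
    simp only [pvAccum]
    by_cases hlt : h + x < minh
    · simp only [hlt, if_true]
      rw [ih (h + x) (i + 1) (i + 1) (h + x)]
      cases hxs : pvAccum (h + x) xs with
      | nil =>
        simp only [pvBest, hlt, if_true, List.foldl_nil, List.idxOf_cons_self]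
        push_cast; ring
      | cons a t =>
        simp only [pvBest]
        have hval : List.foldl min (h + x) (a :: t) = min (h + x) (t.foldl min a) := by
          simp only [List.foldl_cons]; exact pvFoldlMin_min t (h + x) a
        by_cases hm : t.foldl min a < h + x
        · have hne : h + x ≠ t.foldl min a := by omega
          rw [if_pos hm, if_pos (by rw [hval]; omega)]
          rw [show List.foldl min (h + x) (a :: t) = t.foldl min a by rw [hval]; omega]
          rw [List.idxOf_cons_ne _ (fun hc => hne hc)]
          push_cast; ring
        · rw [if_neg hm]
          rw [if_pos (by rw [hval]; omega)]
          rw [show List.foldl min (h + x) (a :: t) = h + x by rw [hval]; omega]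
          rw [List.idxOf_cons_self]
          push_cast; ring
    · simp only [hlt, if_false]
      rw [ih (h + x) (i + 1) lidx minh]
      cases hxs : pvAccum (h + x) xs with
      | nil =>
        simp only [pvBest, List.foldl_nil]
        rw [if_neg (by omega)]
      | cons a t =>
        simp only [pvBest]
        have hval : List.foldl min (h + x) (a :: t) = min (h + x) (t.foldl min a) := by
          simp only [List.foldl_cons]; exact pvFoldlMin_min t (h + x) a
        by_cases hm : t.foldl min a < minh
        · have hne : h + x ≠ t.foldl min a := by omega
          rw [if_pos hm, if_pos (by rw [hval]; omega)]
          rw [show List.foldl min (h + x) (a :: t) = t.foldl min a by rw [hval]; omega]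
          rw [List.idxOf_cons_ne _ (fun hc => hne hc)]
          push_cast; ring
        · rw [if_neg hm, if_neg (by rw [hval]; omega)]

-- Python path[e] = v on a length-L list with -L ≤ e < L writes slot (e % L)
theorem pvSetD_eq (p : List Int) (e v L : Int) (hL : 1 ≤ L) (hp : (p.length : Int) = L)
    (he1 : -L ≤ e) (he2 : e < L) :
    PySem.List.pySetD p e v = p.set (PySem.Int.mod e L).toNat v := by
  have hmod : PySem.Int.mod e L = e % L := PySem.Int.mod_eq_emod_of_pos (by omega)
  unfold PySem.List.pySetD PySem.List.pySet? PySem.List.pyIdx?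
  by_cases he : 0 ≤ e
  · have h1 : e < (p.length : Int) := by omega
    have hm : PySem.Int.mod e L = e := by rw [hmod]; exact Int.emod_eq_of_lt he (by omega)
    simp only [he, if_true, h1, if_true, Option.map_some, Option.getD_some, hm]
  · have hm : PySem.Int.mod e L = e + L := by
      rw [hmod, show e % L = (e + L) % L from (Int.add_emod_right e L).symm]
      exact Int.emod_eq_of_lt (by omega) (by omega)
    have h2 : -(p.length : Int) ≤ e := by omega
    simp only [he, if_false, h2, if_true, Option.map_some, Option.getD_some, hm]
    congr 1
    omega

-- the marking loop turns the replicate array into the membership array of e % L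
theorem pvFold_getElem? (k L : Int) (hL : 1 ≤ L) :
    ∀ (us : List Int) (p : List Int), (p.length : Int) = L →
    (∀ e ∈ us, -L ≤ e ∧ e < L) → ∀ i : Nat, (i : Int) < L →
    (us.foldl (fun q e => PySem.List.pySetD q e (k - 1)) p)[i]?
      = if ((i : Int) ∈ us.map (fun e => PySem.Int.mod e L)) then some (k - 1) else p[i]? := by
  intro us
  induction us with
  | nil => intro p hp hus i hi; simp
  | cons e us ih =>
    intro p hp hus i hi
    obtain ⟨he1, he2⟩ := hus e (by simp)
    rw [List.foldl_cons]
    rw [ih (PySem.List.pySetD p e (k - 1))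
        (by rw [PySem.List.length_pySetD]; exact hp)
        (fun e' he' => hus e' (by simp [he']))
        i hi]
    rw [pvSetD_eq p e (k - 1) L hL hp he1 he2]
    have hmr : 0 ≤ PySem.Int.mod e L ∧ PySem.Int.mod e L < L :=
      ⟨PySem.Int.mod_nonneg e (by omega), PySem.Int.mod_lt e (by omega)⟩
    by_cases hmem : (i : Int) ∈ us.map (fun e => PySem.Int.mod e L)
    · simp [hmem]
    · simp only [List.map_cons, List.mem_cons, hmem, or_false]
      rw [List.getElem?_set]
      by_cases heq : (i : Int) = PySem.Int.mod e L
      · have : (PySem.Int.mod e L).toNat = i := by omega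
        simp [this, heq, show i < p.length by omega]
      · have : ¬ (PySem.Int.mod e L).toNat = i := by omega
        simp [this, heq]

theorem pvAccum_getElem? (h : Int) (p : List Int) :
    ∀ i : Nat, i < p.length → (pvAccum h p)[i]? = some (h + (p.take (i + 1)).sum) := by
  induction p generalizing h with
  | nil => intro i hi; simp at hi
  | cons x xs ih =>
    intro i hi
    cases i with
    | zero => simp [pvAccum]
    | succ j =>
      simp only [pvAccum, List.getElem?_cons_succ, List.take_succ_cons, List.sum_cons]
      rw [ih (h + x) j (by simpa using hi)]
      congr 1
      ring

-- counting marks below j+1 = counting below j plus multiplicity of j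
theorem pvCountP_succ (ms : List Int) (j : Int) :
    ms.countP (fun m => decide (m < j + 1)) = ms.countP (fun m => decide (m < j)) + ms.count j := by
  induction ms with
  | nil => simp
  | cons a t ih =>
    simp only [List.countP_cons, List.count_cons, ih]
    rcases lt_trichotomy a j with h | h | h
    · simp [show a < j + 1 by omega, h, show (a == j) = false by simp; omega]
      omega
    · subst h
      simp [show a < a + 1 by omega]
      omega
    · simp [show ¬ a < j + 1 by omega, show ¬ a < j by omega, show (a == j) = false by simp; omega]

theorem pvSumRange (k : Int) (ms : List Int) (hnd : ms.Nodup) (hge : ∀ m ∈ ms, 0 ≤ m) :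
    ∀ j : Nat, (((List.range j).map (fun i : Nat => if ((i : Int) ∈ ms) then k - 1 else -1)).sum
      = k * (ms.countP (fun m => decide (m < (j : Int)))) - j) := by
  intro j
  induction j with
  | zero =>
    rw [List.countP_eq_zero.mpr (fun m hm => by simpa using not_lt.mpr (hge m hm))]
    simp
  | succ i ih =>
    rw [List.range_succ, List.map_append, List.sum_append, ih]
    have hcast : ((i + 1 : Nat) : Int) = (i : Int) + 1 := by push_cast; ring
    rw [hcast, pvCountP_succ ms (i : Int)]
    by_cases hm : ((i : Int)) ∈ ms
    · rw [List.count_eq_one_of_mem hnd hm]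
      simp only [List.map_cons, List.map_nil, List.sum_cons, List.sum_nil, if_pos hm]
      push_cast; ring
    · rw [List.count_eq_zero_of_not_mem hm]
      simp only [List.map_cons, List.map_nil, List.sum_cons, List.sum_nil, if_neg hm]
      push_cast; ring

-- in a strictly increasing list, exactly j elements lie below the j-th
theorem pvCountP_getElem : ∀ (ms : List Int), ms.Pairwise (· < ·) →
    ∀ (j : Nat) (x : Int), ms[j]? = some x → ms.countP (fun m => decide (m < x)) = j := by
  intro ms
  induction ms with
  | nil => intro _ j x hj; simp at hj
  | cons a t ih =>
    intro hpl j x hj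
    obtain ⟨ha, htail⟩ := List.pairwise_cons.mp hpl
    cases j with
    | zero =>
      simp only [List.getElem?_cons_zero, Option.some_inj] at hj
      subst hj
      simp only [List.countP_cons]
      rw [List.countP_eq_zero.mpr (fun m hm => by simpa using not_lt.mpr (le_of_lt (ha m hm)))]
      simp
    | succ i =>
      simp only [List.getElem?_cons_succ] at hj
      simp only [List.countP_cons]
      rw [ih htail i x hj]
      have hlt : a < x := ha x (List.mem_of_getElem? hj)
      simp [hlt]

-- closed form of the prefix heights of the membership path
theorem pvHts_getElem? (k L : Int) (ms : List Int) (hnd : ms.Nodup) (hge : ∀ m ∈ ms, 0 ≤ m) :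
    ∀ i : Nat, i < L.toNat →
    (pvAccum 0 (pvPathL k L ms))[i]?
      = some (k * (ms.countP (fun m => decide (m < (i : Int) + 1))) - (i + 1)) := by
  intro i hi
  have hlen : (pvPathL k L ms).length = L.toNat := by simp [pvPathL]
  rw [pvAccum_getElem? 0 (pvPathL k L ms) i (by omega)]
  congr 1
  unfold pvPathL
  rw [← List.map_take, List.take_range, min_eq_left (by omega)]
  rw [pvSumRange k ms hnd hge (i + 1)]
  push_cast; ring

theorem pvSfold_keep : ∀ (ps : List (Int × Int)) (st : Int × Int),
    (∀ c ∈ ps, st.1 ≤ c.1) → pvSfold ps st = st := by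
  intro ps
  induction ps with
  | nil => intro st _; rfl
  | cons c t ih =>
    intro st h
    unfold pvSfold at ih ⊢
    rw [List.foldl_cons, if_neg (not_lt.mpr (h c (by simp)))]
    exact ih st (fun d hd => h d (by simp [hd]))

-- the fold picks the pair (M, I) when it is present, everything is ≥ M,
-- and everything left of I is > M
theorem pvSfold_first (M I : Int) : ∀ (ps : List (Int × Int)) (st : Int × Int),
    ps.Pairwise (fun c d => c.2 < d.2) → (M, I) ∈ ps → (∀ c ∈ ps, M ≤ c.1) →
    (∀ c ∈ ps, c.2 < I → M < c.1) → M < st.1 → pvSfold ps st = (M, I) := by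
  intro ps
  induction ps with
  | nil => intro st _ hmem; simp at hmem
  | cons c t ih =>
    intro st hpw hmem hge hleft hst
    obtain ⟨hhd, htail⟩ := List.pairwise_cons.mp hpw
    by_cases hc : c = (M, I)
    · subst hc
      unfold pvSfold
      rw [List.foldl_cons, if_pos hst]
      exact pvSfold_keep t (M, I) (fun d hd => hge d (by simp [hd]))
    · have hmt : (M, I) ∈ t := by
        rcases List.mem_cons.mp hmem with h | h
        · exact absurd h.symm hc
        · exact h
      have hcI : c.2 < I := hhd (M, I) hmt
      have hcM : M < c.1 := hleft c (by simp) hcI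
      unfold pvSfold at ih ⊢
      rw [List.foldl_cons]
      by_cases hlt : c.1 < st.1
      · rw [if_pos hlt]
        exact ih c htail hmt (fun d hd => hge d (by simp [hd]))
          (fun d hd hdi => hleft d (by simp [hd]) hdi) hcM
      · rw [if_neg hlt]
        exact ih st htail hmt (fun d hd => hge d (by simp [hd]))
          (fun d hd hdi => hleft d (by simp [hd]) hdi) hst

-- first occurrence: everything before idxOf differs
theorem pvIdxOf_first (l : List Int) (x : Int) :
    ∀ j : Nat, j < l.idxOf x → l[j]? ≠ some x := by
  induction l with
  | nil => intro j hj; simp at hj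
  | cons a t ih =>
    intro j hj
    by_cases ha : a = x
    · subst ha; rw [List.idxOf_cons_self] at hj; omega
    · rw [List.idxOf_cons_ne _ (fun hc => ha hc)] at hj
      cases j with
      | zero => simpa using ha
      | succ i =>
        simp only [List.getElem?_cons_succ]
        exact ih i (by omega)

-- B's candidate list: (height just before the j-th positive mark, its index), plus the endpoint
def pvCP (k L : Int) (marks : List Int) : List (Int × Int) :=
  ((PySem.List.enumerate marks 0).filter (fun jm => decide (jm.2 > 0))).map
    (fun jm => (k * jm.1 - jm.2, jm.2 - 1)) ++ [(k * (marks.length : Int) - L, L - 1)]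

-- B's fold (guarded enumerate fold, then the endpoint test) is the strict-first
-- running-minimum fold over the candidate list
theorem pvBfold_eq (k L : Int) (marks : List Int) :
    (let st := (PySem.List.enumerate marks 0).foldl
      (fun (st : Int × Int) jm =>
        if jm.2 > 0 ∧ k * jm.1 - jm.2 < st.1 then (k * jm.1 - jm.2, jm.2 - 1) else st)
      ((0 : Int), (-1 : Int));
     if k * (marks.length : Int) - L < st.1 then (k * (marks.length : Int) - L, L - 1) else st)
    = pvSfold (pvCP k L marks) (0, -1) := by
  have hstep : (fun (st : Int × Int) (jm : Int × Int) =>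
      if jm.2 > 0 ∧ k * jm.1 - jm.2 < st.1 then (k * jm.1 - jm.2, jm.2 - 1) else st)
      = fun (st : Int × Int) (jm : Int × Int) =>
        if jm.2 > 0 then (if k * jm.1 - jm.2 < st.1 then (k * jm.1 - jm.2, jm.2 - 1) else st) else st := by
    funext st jm
    by_cases h1 : jm.2 > 0 <;> by_cases h2 : k * jm.1 - jm.2 < st.1 <;> simp [h1, h2]
  unfold pvCP pvSfold
  rw [List.foldl_append, List.foldl_map]
  simp only [List.foldl_cons, List.foldl_nil]
  rw [hstep, PySem.List.foldl_ite_eq_foldl_filter (fun jm : Int × Int => jm.2 > 0)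
    (fun (st : Int × Int) jm => if k * jm.1 - jm.2 < st.1 then (k * jm.1 - jm.2, jm.2 - 1) else st)]

theorem pvCP_pairwise (k L : Int) (marks : List Int) (hpl : marks.Pairwise (· < ·))
    (hltL : ∀ m ∈ marks, m < L) :
    (pvCP k L marks).Pairwise (fun c d => c.2 < d.2) := by
  unfold pvCP
  rw [List.pairwise_append]
  refine ⟨?_, by simp, ?_⟩
  · rw [List.pairwise_map]
    have h1 : (PySem.List.enumerate marks 0).Pairwise (fun p q => p.2 < q.2) := by
      have h2 : ((PySem.List.enumerate marks 0).map (·.2)).Pairwise (· < ·) := by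
        rw [PySem.List.map_snd_enumerate]; exact hpl
      exact (List.pairwise_map.mp h2)
    exact (h1.filter _).imp (fun h => by omega)
  · intro c hc d hd
    simp only [List.mem_singleton] at hd
    subst hd
    obtain ⟨jm, hjm, hcf⟩ := List.mem_map.mp hc
    have hjm2 : jm ∈ PySem.List.enumerate marks 0 := (List.mem_filter.mp hjm).1
    obtain ⟨j, hj, hje⟩ := (PySem.List.mem_enumerate_iff _ _ _).mp hjm2
    have hmems : jm.2 ∈ marks := by rw [hje]; simp [List.getElem_mem]
    have := hltL jm.2 hmems
    rw [← hcf]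
    simp only []
    omega

theorem pvCP_mem (k L : Int) (hL : 1 ≤ L) (marks : List Int) (hpl : marks.Pairwise (· < ·))
    (hnd : marks.Nodup) (hge : ∀ m ∈ marks, 0 ≤ m) (hltL : ∀ m ∈ marks, m < L) :
    ∀ c ∈ pvCP k L marks, ∃ idx : Nat, idx < L.toNat ∧ c.2 = (idx : Int) ∧
      (pvAccum 0 (pvPathL k L marks))[idx]? = some c.1 := by
  intro c hc
  unfold pvCP at hc
  rcases List.mem_append.mp hc with hc | hc
  · obtain ⟨jm, hjm, hcf⟩ := List.mem_map.mp hc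
    obtain ⟨hjm2, hposd⟩ := List.mem_filter.mp hjm
    obtain ⟨j, hj, hje⟩ := (PySem.List.mem_enumerate_iff _ _ _).mp hjm2
    subst hje
    simp only [zero_add] at hcf hposd
    have hpos : (0 : Int) < marks[j] := by
      have := of_decide_eq_true hposd; omega
    have hmj : marks[j] < L := hltL marks[j] (List.getElem_mem hj)
    refine ⟨(marks[j] - 1).toNat, by omega, by rw [← hcf]; omega, ?_⟩
    rw [pvHts_getElem? k L marks hnd hge _ (by omega)]
    have h5 : (((marks[j] - 1).toNat : Nat) : Int) + 1 = marks[j] := by omega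
    rw [h5, pvCountP_getElem marks hpl j marks[j] (List.getElem?_eq_getElem hj)]
    rw [← hcf]
  · simp only [List.mem_singleton] at hc
    subst hc
    refine ⟨L.toNat - 1, by omega, by simp only []; omega, ?_⟩
    rw [pvHts_getElem? k L marks hnd hge _ (by omega)]
    have h5 : (((L.toNat - 1 : Nat)) : Int) + 1 = L := by omega
    rw [h5, List.countP_eq_length.mpr (fun m hm => decide_eq_true (hltL m hm))]

theorem pvCP_contains (k L : Int) (hL : 1 ≤ L) (marks : List Int) (hpl : marks.Pairwise (· < ·))
    (hnd : marks.Nodup) (hge : ∀ m ∈ marks, 0 ≤ m) (hltL : ∀ m ∈ marks, m < L) :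
    ∀ (i0 : Nat) (v : Int), i0 < L.toNat → ((i0 : Int) = L - 1 ∨ ((i0 : Int) + 1) ∈ marks) →
    (pvAccum 0 (pvPathL k L marks))[i0]? = some v → (v, (i0 : Int)) ∈ pvCP k L marks := by
  intro i0 v hi0 hcand hv
  rw [pvHts_getElem? k L marks hnd hge i0 hi0, Option.some_inj] at hv
  unfold pvCP
  rcases hcand with hend | hmark
  · -- the endpoint candidate
    apply List.mem_append_right
    simp only [List.mem_singleton, Prod.mk.injEq]
    constructor
    · rw [← hv]
      have h5 : (i0 : Int) + 1 = L := by omega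
      rw [h5, List.countP_eq_length.mpr (fun m hm => decide_eq_true (hltL m hm))]
    · omega
  · -- just before a mark
    apply List.mem_append_left
    obtain ⟨j, hj, hje⟩ := List.mem_iff_getElem.mp hmark
    apply List.mem_map.mpr
    refine ⟨((j : Int), marks[j]), ?_, ?_⟩
    · apply List.mem_filter.mpr
      refine ⟨?_, by simp; omega⟩
      apply (PySem.List.mem_enumerate_iff _ _ _).mpr
      exact ⟨j, hj, by simp⟩
    · simp only [Prod.mk.injEq]
      constructor
      · rw [← hv]
        have h5 : (i0 : Int) + 1 = marks[j] := by omega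
        rw [h5, pvCountP_getElem marks hpl j marks[j] (List.getElem?_eq_getElem hj)]
      · omega

-- the heart: B's candidate fold lands on A's first-minimum rotation index
theorem pvLidx_eq (k L : Int) (hL : 1 ≤ L) (marks : List Int) (hpl : marks.Pairwise (· < ·))
    (hnd : marks.Nodup) (hge : ∀ m ∈ marks, 0 ≤ m) (hltL : ∀ m ∈ marks, m < L)
    (a : Int) (t : List Int) (hH : pvAccum 0 (pvPathL k L marks) = a :: t) :
    (pvSfold (pvCP k L marks) (0, -1)).2 + 1 = pvBest 0 0 0 (a :: t) := by
  have hlenH : (a :: t).length = L.toNat := by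
    rw [← hH, pvAccum_length]; simp [pvPathL]
  set M := t.foldl min a with hMdef
  have hMmem : M ∈ a :: t := pvFoldlMin_mem t a
  have hMle : ∀ y ∈ a :: t, M ≤ y := by
    intro y hy
    rcases List.mem_cons.mp hy with h | h
    · rw [h]; exact (PySem.List.foldl_min_le t a).1
    · exact (PySem.List.foldl_min_le t a).2 y h
  by_cases hM : M < 0
  · set i0 := (a :: t).idxOf M with hi0def
    have hi0lt : i0 < (a :: t).length := List.idxOf_lt_length_of_mem hMmem
    have hi0get : (a :: t)[i0]? = some M := by
      rw [List.getElem?_eq_getElem hi0lt, List.getElem_idxOf]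
    -- the first minimum is a candidate: the endpoint, or the step before a mark
    have hcand : ((i0 : Int) = L - 1 ∨ ((i0 : Int) + 1) ∈ marks) := by
      by_cases hend : i0 = L.toNat - 1
      · left; omega
      · right
        have hi1 : i0 + 1 < L.toNat := by omega
        by_contra hnm
        have h1 := pvHts_getElem? k L marks hnd hge i0 (by omega)
        have h2 := pvHts_getElem? k L marks hnd hge (i0 + 1) hi1
        rw [hH] at h1 h2
        rw [hi0get, Option.some_inj] at h1
        have h3 := pvCountP_succ marks ((i0 : Int) + 1)
        have h4 : marks.count ((i0 : Int) + 1) = 0 := List.count_eq_zero_of_not_mem hnm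
        have h5 : ((i0 + 1 : Nat) : Int) = (i0 : Int) + 1 := by push_cast; ring
        rw [h5, h3, h4] at h2
        simp only [Nat.add_zero] at h2
        -- the value at i0+1 is M - 1, contradicting minimality
        have h6 := hMle _ (List.mem_of_getElem? h2)
        omega
    have hin : (M, (i0 : Int)) ∈ pvCP k L marks :=
      pvCP_contains k L hL marks hpl hnd hge hltL i0 M (by omega) hcand (by rw [hH]; exact hi0get)
    have hsf : pvSfold (pvCP k L marks) (0, -1) = (M, (i0 : Int)) := by
      refine pvSfold_first M ((i0 : Int)) _ _ (pvCP_pairwise k L marks hpl hltL) hin ?_ ?_ hM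
      · intro c hc
        obtain ⟨idx, hidx, hc2, hcv⟩ := pvCP_mem k L hL marks hpl hnd hge hltL c hc
        rw [hH] at hcv
        exact hMle c.1 (List.mem_of_getElem? hcv)
      · intro c hc hlt2
        obtain ⟨idx, hidx, hc2, hcv⟩ := pvCP_mem k L hL marks hpl hnd hge hltL c hc
        rw [hH] at hcv
        have hidxlt : idx < i0 := by omega
        have hne := pvIdxOf_first (a :: t) M idx (by omega)
        have hle := hMle c.1 (List.mem_of_getElem? hcv)
        rcases lt_or_eq_of_le hle with h | h
        · exact h
        · exact absurd (h ▸ hcv) hne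
    rw [hsf]
    change (i0 : Int) + 1 = if List.foldl min a t < 0 then 0 + ((List.idxOf (List.foldl min a t) (a :: t) : Int)) + 1 else 0
    rw [← hMdef, if_pos hM, ← hi0def]
    omega
  · have hsf : pvSfold (pvCP k L marks) (0, -1) = (0, -1) := by
      apply pvSfold_keep
      intro c hc
      obtain ⟨idx, hidx, hc2, hcv⟩ := pvCP_mem k L hL marks hpl hnd hge hltL c hc
      rw [hH] at hcv
      have := hMle c.1 (List.mem_of_getElem? hcv)
      simp only []
      omega
    rw [hsf]
    change (-1 : Int) + 1 = if List.foldl min a t < 0 then 0 + ((List.idxOf (List.foldl min a t) (a :: t) : Int)) + 1 else 0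
    rw [← hMdef, if_neg hM]
    norm_num

-- ===== VERDICT (by name: the statement is the Claim_ definition above) =====
theorem comb_to_path_spec : Claim_equal_comb_to_path := by
  intro n k uset hdom hpre
  obtain ⟨hk, hbound⟩ := hpre
  show comb_to_path n k uset = comb_to_path_alt n k uset
  unfold comb_to_path comb_to_path_alt
  simp only []
  set L := k * n + 1 with hLdef
  have hL : 1 ≤ L := by omega
  set mods := uset.map (fun e => PySem.Int.mod e L) with hmodsdef
  set marks := PySem.List.sorted (PySem.Set.ofList mods) (fun x => x) false with hmarksdef
  have hmem : ∀ x : Int, x ∈ marks ↔ x ∈ mods := by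
    intro x; rw [hmarksdef, PySem.List.mem_sorted, PySem.Set.mem_ofList]
  have hpl : marks.Pairwise (· < ·) := by
    rw [hmarksdef]; exact PySem.List.sorted_ofList_pairwise_lt mods
  have hnd : marks.Nodup := hpl.imp (fun h => ne_of_lt h)
  have hge : ∀ m ∈ marks, 0 ≤ m := by
    intro m hm
    obtain ⟨e, he, hme⟩ := List.mem_map.mp ((hmem m).mp hm)
    rw [← hme]; exact PySem.Int.mod_nonneg e (by omega)
  have hltL : ∀ m ∈ marks, m < L := by
    intro m hm
    obtain ⟨e, he, hme⟩ := List.mem_map.mp ((hmem m).mp hm)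
    rw [← hme]; exact PySem.Int.mod_lt e (by omega)
  -- both step arrays are the membership path of the marks
  have hA : uset.foldl (fun p e => PySem.List.pySetD p e (k - 1)) (List.replicate L.toNat (-1))
      = pvPathL k L marks := by
    have hlen1 : (uset.foldl (fun p e => PySem.List.pySetD p e (k - 1)) (List.replicate L.toNat (-1))).length = L.toNat := by
      rw [pvMark_length, List.length_replicate]
    have hlen2 : (pvPathL k L marks).length = L.toNat := by simp [pvPathL]
    apply List.ext_getElem?
    intro i
    by_cases hi : i < L.toNat
    · rw [pvFold_getElem? k L hL uset _ (by rw [List.length_replicate]; omega)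
        (fun e he => by have := hbound e he; omega) i (by omega)]
      have hR : (pvPathL k L marks)[i]? = some (if ((i : Int) ∈ marks) then k - 1 else -1) := by
        unfold pvPathL
        rw [List.getElem?_map, List.getElem?_range hi]
        rfl
      rw [hR, List.getElem?_replicate]
      by_cases hm : (i : Int) ∈ mods
      · rw [if_pos hm, if_pos ((hmem _).mpr hm)]
      · rw [if_neg hm, if_neg (fun hc => hm ((hmem _).mp hc)), if_pos hi]
    · rw [List.getElem?_eq_none (by omega), List.getElem?_eq_none (by omega)]
  have hB : (PySem.List.pyRange 0 L 1).map (fun i => if i ∈ PySem.Set.ofList marks then k - 1 else -1)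
      = pvPathL k L marks := by
    rw [PySem.Set.ofList_eq_self_of_nodup marks hnd, PySem.List.pyRange_one, List.map_map]
    unfold pvPathL
    rw [show L - 0 = L from by ring]
    apply List.map_congr_left
    intro i _
    simp [Function.comp, zero_add]
  rw [hA, hB]
  have hlenP : (pvPathL k L marks).length = L.toNat := by simp [pvPathL]
  cases hHcase : pvAccum 0 (pvPathL k L marks) with
  | nil =>
    exfalso
    have := pvAccum_length 0 (pvPathL k L marks)
    rw [hHcase] at this
    simp at this
    omega
  | cons a t =>
    rw [pvScan_eq, hHcase, pvBfold_eq k L marks,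
      pvLidx_eq k L hL marks hpl hnd hge hltL a t hHcase,
      PySem.List.slice_to_neg_one]
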